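-- pv_equiv track=rewrite | github.com/pdl30/pynoncode | pynoncode/counts.py | get_unique_total_for_reads
-- ===== SOURCE A (Python) =====
-- def get_unique_total_for_reads(unique_dict, multi_dict):
-- 	read_total = {}
-- 	multi_count = {}
-- 	#Gets total unique count for multimapped reads and multi count tells me how many genes are found in the unique dict
-- 	for read_id in multi_dict["transcript_counts"]:
-- 		for value in multi_dict["transcript_counts"][read_id]: #Transcript_counts is a tuple of transript and read count
-- 			if value[0] not in unique_dict["transcript_counts"]: #only need transcript
-- 				pass
-- 			else:
-- 				if read_id not in read_total:
-- 					read_total[read_id] = int(unique_dict["transcript_counts"][value[0]])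
-- 					multi_count[read_id] = 1
-- 				else:
-- 					read_total[read_id] += int(unique_dict["transcript_counts"][value[0]])
-- 					multi_count[read_id] += 1
-- 	return read_total, multi_count
-- ===== SOURCE B (Python) =====
-- def get_unique_total_for_reads(unique_dict, multi_dict):
--     utc = unique_dict.get("transcript_counts", {})
--     # Phase 1: flatten everything into one stream of (read_id, unique count) pairs,
--     # one pair per matched transcript occurrence.
--     pairs = [(read_id, int(utc[t]))
--              for read_id, values in multi_dict["transcript_counts"].items()
--              for t, _ in values if t in utc]
--     # Phase 2: pairs of one read are contiguous, so aggregate by run-length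
--     # grouping of equal read ids with a current-run accumulator.
--     read_total = {}
--     multi_count = {}
--     cur = None  # (read_id, running sum, run length)
--     for read_id, c in pairs:
--         if cur is None or cur[0] != read_id:
--             if cur is not None:
--                 read_total[cur[0]] = cur[1]
--                 multi_count[cur[0]] = cur[2]
--             cur = (read_id, c, 1)
--         else:
--             cur = (cur[0], cur[1] + c, cur[2] + 1)
--     if cur is not None:
--         read_total[cur[0]] = cur[1]
--         multi_count[cur[0]] = cur[2]
--     return read_total, multi_count
-- ===== Notes on version B (the rewrite author's own statement) =====
-- stated objective: alternative
-- what changed: Replaces A's fused nested loop that initialises-or-accumulates into the two output dicts with a two-phase flatten-then-group algorithm: first flatten all matches into one stream of (read_id, unique count) pairs, then aggregate by run-length grouping of consecutive equal read ids with a single current-run accumulator, flushing a run into the outputs only when it closes.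
import Mathlib
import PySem

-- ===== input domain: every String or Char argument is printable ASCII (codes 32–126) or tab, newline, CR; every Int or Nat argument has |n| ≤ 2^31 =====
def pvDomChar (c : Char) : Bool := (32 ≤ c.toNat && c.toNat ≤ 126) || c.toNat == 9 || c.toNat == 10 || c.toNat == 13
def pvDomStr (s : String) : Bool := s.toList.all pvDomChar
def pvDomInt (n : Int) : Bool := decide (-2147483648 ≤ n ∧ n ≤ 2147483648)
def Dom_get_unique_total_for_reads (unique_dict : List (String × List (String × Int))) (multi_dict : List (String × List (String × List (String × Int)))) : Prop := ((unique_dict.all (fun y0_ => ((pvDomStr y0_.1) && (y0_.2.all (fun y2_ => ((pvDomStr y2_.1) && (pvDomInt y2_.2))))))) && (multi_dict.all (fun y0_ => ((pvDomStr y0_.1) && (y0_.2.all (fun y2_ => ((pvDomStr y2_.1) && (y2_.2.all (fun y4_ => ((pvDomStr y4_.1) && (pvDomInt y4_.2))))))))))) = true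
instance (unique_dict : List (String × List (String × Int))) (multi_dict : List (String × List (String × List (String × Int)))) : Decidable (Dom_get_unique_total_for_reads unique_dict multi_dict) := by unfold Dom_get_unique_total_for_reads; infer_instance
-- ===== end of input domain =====

-- B replaces A's fused nested init-or-accumulate loop by a two-phase flatten-then-run-group
-- algorithm (one flat stream of (read_id, count) pairs, then run-length grouping of equal read
-- ids with a current-run accumulator); objective: alternative.
-- Equivalence is about the RETURN value (neither version mutates its arguments).

-- ===== PORT A =====
-- A's inner-loop body: 'for value in …: if value[0] not in utc: pass else: init-or-accumulate'.
-- int(...) on a value that is already an int is the identity, so it is ported as the value itself.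
def pvStepA (unique_dict : List (String × List (String × Int)))
    (read_id : String) (st : PySem.Dict String Int × PySem.Dict String Int)
    (value : String × Int) : PySem.Dict String Int × PySem.Dict String Int :=
  let utc := PySem.Dict.mk ((PySem.Dict.mk unique_dict).getD "transcript_counts" [])
  if utc.contains value.1 = false then st
  else
    if st.1.contains read_id = false then
      (st.1.insert read_id (utc.getD value.1 0), st.2.insert read_id 1)
    else
      (st.1.insert read_id (st.1.getD read_id 0 + utc.getD value.1 0),
       st.2.insert read_id (st.2.getD read_id 0 + 1))

def get_unique_total_for_reads (unique_dict : List (String × List (String × Int))) (multi_dict : List (String × List (String × List (String × Int)))) : (List (String × Int)) × (List (String × Int)) :=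
  let tc := PySem.Dict.mk ((PySem.Dict.mk multi_dict).getD "transcript_counts" [])
  let res := tc.keys.foldl
    (fun st read_id => (tc.getD read_id []).foldl (pvStepA unique_dict read_id) st)
    ((PySem.Dict.empty : PySem.Dict String Int), (PySem.Dict.empty : PySem.Dict String Int))
  (res.1.items, res.2.items)

-- ===== PORT B =====
-- B's grouping-loop body: flush the current run when the read id changes, else extend it.
def pvGroupStep
    (acc : (PySem.Dict String Int × PySem.Dict String Int) × Option (String × Int × Int))
    (p : String × Int) : (PySem.Dict String Int × PySem.Dict String Int) × Option (String × Int × Int) :=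
  match acc.2 with
  | none => (acc.1, some (p.1, p.2, 1))
  | some (r0, s, n) =>
    if r0 ≠ p.1 then
      ((acc.1.1.insert r0 s, acc.1.2.insert r0 n), some (p.1, p.2, 1))
    else
      (acc.1, some (r0, s + p.2, n + 1))

def get_unique_total_for_reads_alt (unique_dict : List (String × List (String × Int))) (multi_dict : List (String × List (String × List (String × Int)))) : (List (String × Int)) × (List (String × Int)) :=
  let utc := PySem.Dict.mk ((PySem.Dict.mk unique_dict).getD "transcript_counts" [])
  let tc := PySem.Dict.mk ((PySem.Dict.mk multi_dict).getD "transcript_counts" [])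
  -- phase 1: the flat stream of (read_id, unique count) pairs
  let pairs := tc.items.flatMap (fun q =>
    (q.2.filter (fun v => utc.contains v.1)).map (fun v => (q.1, utc.getD v.1 0)))
  -- phase 2: run-length grouping, then the final flush
  let res := pairs.foldl pvGroupStep
    (((PySem.Dict.empty : PySem.Dict String Int), (PySem.Dict.empty : PySem.Dict String Int)), none)
  let fin := match res.2 with
    | none => res.1
    | some (r, s, n) => (res.1.1.insert r s, res.1.2.insert r n)
  (fin.1.items, fin.2.items)

-- ===== PRECONDITION & SPEC =====
-- Pre_ = exactly the inputs where the Python A returns: it raises KeyError when multi_dict lacks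
-- "transcript_counts", and (at the first value processed) when unique_dict lacks it while some read
-- has a nonempty value list.  The Nodup clause only rules out association lists with duplicate
-- read_id keys, which do not represent any Python dict input (a Python dict has unique keys).
def Pre_get_unique_total_for_reads (unique_dict : List (String × List (String × Int))) (multi_dict : List (String × List (String × List (String × Int)))) : Prop :=
  (PySem.Dict.mk multi_dict).contains "transcript_counts" = true ∧
  (((PySem.Dict.mk multi_dict).getD "transcript_counts" []).map Prod.fst).Nodup ∧
  ((PySem.Dict.mk unique_dict).contains "transcript_counts" = true ∨
    ∀ p ∈ (PySem.Dict.mk multi_dict).getD "transcript_counts" [], p.2 = [])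
instance (unique_dict : List (String × List (String × Int))) (multi_dict : List (String × List (String × List (String × Int)))) : Decidable (Pre_get_unique_total_for_reads unique_dict multi_dict) := by unfold Pre_get_unique_total_for_reads; infer_instance

def pvWitness_get_unique_total_for_reads : (List (String × List (String × Int))) × (List (String × List (String × List (String × Int)))) :=
  ([("transcript_counts", [("t1", 5), ("t2", 2)])],
   [("transcript_counts", [("r1", [("t1", 1), ("t3", 4), ("t2", 1)]), ("r2", [("t3", 2)])])])

def Spec_get_unique_total_for_reads (unique_dict : List (String × List (String × Int))) (multi_dict : List (String × List (String × List (String × Int)))) (out : (List (String × Int)) × (List (String × Int))) : Prop := out = get_unique_total_for_reads_alt unique_dict multi_dict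
instance (unique_dict : List (String × List (String × Int))) (multi_dict : List (String × List (String × List (String × Int)))) (out : (List (String × Int)) × (List (String × Int))) : Decidable (Spec_get_unique_total_for_reads unique_dict multi_dict out) := by unfold Spec_get_unique_total_for_reads; infer_instance

-- ===== CLAIM (what is proved, stated in full; the proofs are below) =====
def Claim_equal_get_unique_total_for_reads : Prop := ∀ (unique_dict : List (String × List (String × Int))) (multi_dict : List (String × List (String × List (String × Int)))), Dom_get_unique_total_for_reads unique_dict multi_dict → Pre_get_unique_total_for_reads unique_dict multi_dict → Spec_get_unique_total_for_reads unique_dict multi_dict (get_unique_total_for_reads unique_dict multi_dict)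

-- ===== LEMMAS AND PROOFS =====

-- The matched-counts list of one read (proof-side normal form).
def pvMatches (unique_dict : List (String × List (String × Int))) (values : List (String × Int)) : List Int :=
  let utc := PySem.Dict.mk ((PySem.Dict.mk unique_dict).getD "transcript_counts" [])
  (values.filter (fun v => utc.contains v.1)).map (fun v => utc.getD v.1 0)

-- Proof-side per-read normal form both programs are reduced to.
def pvStepB (unique_dict : List (String × List (String × Int)))
    (st : PySem.Dict String Int × PySem.Dict String Int)
    (p : String × List (String × Int)) : PySem.Dict String Int × PySem.Dict String Int :=
  let ms := pvMatches unique_dict p.2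
  if ms.isEmpty then st
  else (st.1.insert p.1 ms.sum, st.2.insert p.1 (ms.length : Int))

-- The flat segment one read contributes in B.
def pvSeg (unique_dict : List (String × List (String × Int))) (q : String × List (String × Int)) : List (String × Int) :=
  let utc := PySem.Dict.mk ((PySem.Dict.mk unique_dict).getD "transcript_counts" [])
  (q.2.filter (fun v => utc.contains v.1)).map (fun v => (q.1, utc.getD v.1 0))

-- B's grouping loop + final flush.
def pvG (xs : List (String × Int))
    (acc : (PySem.Dict String Int × PySem.Dict String Int) × Option (String × Int × Int)) :
    PySem.Dict String Int × PySem.Dict String Int :=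
  let res := xs.foldl pvGroupStep acc
  match res.2 with
  | none => res.1
  | some (r, s, n) => (res.1.1.insert r s, res.1.2.insert r n)

-- A's inner loop once read_id is present (last inserted with a resp. b): it keeps accumulating.
theorem pvInnerAcc (u : List (String × List (String × Int))) (r : String)
    (values : List (String × Int)) :
    ∀ (d1 d2 : PySem.Dict String Int) (a b : Int),
    values.foldl (pvStepA u r) (d1.insert r a, d2.insert r b)
      = (d1.insert r (a + (pvMatches u values).sum), d2.insert r (b + (pvMatches u values).length)) := by
  induction values with
  | nil => intro d1 d2 a b; simp [pvMatches]
  | cons v vs ih =>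
    intro d1 d2 a b
    by_cases hc : (PySem.Dict.mk ((PySem.Dict.mk u).getD "transcript_counts" [])).contains v.1 = true
    · simp only [List.foldl_cons, pvStepA, hc, Bool.true_eq_false, if_false,
        PySem.Dict.contains_insert_self, PySem.Dict.getD_insert_self,
        PySem.Dict.insert_insert_self]
      rw [ih]
      simp only [pvMatches, List.filter_cons, hc, if_true, List.map_cons, List.sum_cons,
        List.length_cons]
      refine congrArg₂ Prod.mk ?_ ?_ <;> (congr 1) <;> (push_cast; ring)
    · simp only [Bool.not_eq_true] at hc
      simp only [List.foldl_cons, pvStepA, hc, if_true]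
      rw [ih]
      simp only [pvMatches, List.filter_cons, hc, Bool.false_eq_true, if_false]

-- A's inner loop from a state not containing read_id equals the per-read normal form.
theorem pvInnerFresh (u : List (String × List (String × Int))) (r : String)
    (values : List (String × Int)) (st : PySem.Dict String Int × PySem.Dict String Int)
    (h1 : st.1.contains r = false) :
    values.foldl (pvStepA u r) st
      = if (pvMatches u values).isEmpty then st
        else (st.1.insert r (pvMatches u values).sum, st.2.insert r ((pvMatches u values).length : Int)) := by
  induction values generalizing st with
  | nil => simp [pvMatches]
  | cons v vs ih =>
    by_cases hc : (PySem.Dict.mk ((PySem.Dict.mk u).getD "transcript_counts" [])).contains v.1 = true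
    · simp only [List.foldl_cons, pvStepA, hc, Bool.true_eq_false, if_false, h1, if_true]
      rw [pvInnerAcc]
      simp only [pvMatches, List.filter_cons, hc, if_true, List.map_cons, List.sum_cons,
        List.length_cons, List.isEmpty_cons]
      simp only [if_false, Bool.false_eq_true]
      refine congrArg₂ Prod.mk ?_ ?_ <;> (congr 1)
      push_cast; ring
    · simp only [Bool.not_eq_true] at hc
      simp only [List.foldl_cons, pvStepA, hc, if_true]
      rw [ih st h1]
      simp only [pvMatches, List.filter_cons, hc, Bool.false_eq_true, if_false]

-- A's outer loop equals the foldl of the per-read normal form, by induction with the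
-- invariant that upcoming read_ids are not yet keys of read_total.
theorem pvOuter (u : List (String × List (String × Int))) :
    ∀ (l : List (String × List (String × Int))) (st : PySem.Dict String Int × PySem.Dict String Int),
    (l.map Prod.fst).Nodup → (∀ p ∈ l, st.1.contains p.1 = false) →
    l.foldl (fun st p => p.2.foldl (pvStepA u p.1) st) st = l.foldl (pvStepB u) st := by
  intro l
  induction l with
  | nil => intro st _ _; rfl
  | cons p l ih =>
    intro st hnd hf
    simp only [List.foldl_cons]
    rw [pvInnerFresh u p.1 p.2 st (hf p (List.mem_cons_self))]
    have hstep : (if (pvMatches u p.2).isEmpty then st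
        else (st.1.insert p.1 (pvMatches u p.2).sum, st.2.insert p.1 ((pvMatches u p.2).length : Int)))
        = pvStepB u st p := rfl
    rw [hstep]
    simp only [List.map_cons, List.nodup_cons] at hnd
    apply ih _ hnd.2
    intro q hq
    have hne : q.1 ≠ p.1 := by
      intro h; exact hnd.1 (h ▸ List.mem_map_of_mem hq)
    unfold pvStepB
    by_cases he : (pvMatches u p.2).isEmpty
    · simp only [he, if_true]
      exact hf q (List.mem_cons_of_mem _ hq)
    · simp only [Bool.not_eq_true] at he
      simp only [he, Bool.false_eq_true, if_false]
      simp only [PySem.Dict.contains_insert, hf q (List.mem_cons_of_mem _ hq), Bool.or_false]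
      simpa using hne

-- B's grouping loop over a run of pairs all carrying the same read id keeps accumulating.
theorem pvRun (seg : List (String × Int)) (r : String) :
    (∀ x ∈ seg, x.1 = r) →
    ∀ (st : PySem.Dict String Int × PySem.Dict String Int) (s n : Int),
    seg.foldl pvGroupStep (st, some (r, s, n))
      = (st, some (r, s + (seg.map Prod.snd).sum, n + (seg.length : Int))) := by
  induction seg with
  | nil => intro _ st s n; simp
  | cons x t ih =>
    intro h st s n
    have hx : x.1 = r := h x (List.mem_cons_self)
    simp only [List.foldl_cons, pvGroupStep, hx, ne_eq, not_true_eq_false, if_false]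
    rw [ih (fun y hy => h y (List.mem_cons_of_mem _ hy))]
    simp only [List.map_cons, List.sum_cons, List.length_cons]
    have h1 : s + x.2 + (t.map Prod.snd).sum = s + (x.2 + (t.map Prod.snd).sum) := by ring
    have h2 : n + 1 + (t.length : Int) = n + ((t.length + 1 : Nat) : Int) := by push_cast; ring
    rw [h1, h2]

-- An open run may be flushed early when no upcoming pair carries its read id.
theorem pvDefer (xs : List (String × Int)) (r : String) (s n : Int)
    (st : PySem.Dict String Int × PySem.Dict String Int)
    (h : ∀ x ∈ xs, x.1 ≠ r) :
    pvG xs (st, some (r, s, n)) = pvG xs ((st.1.insert r s, st.2.insert r n), none) := by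
  cases xs with
  | nil => rfl
  | cons x t =>
    have hx : r ≠ x.1 := fun he => h x (List.mem_cons_self) he.symm
    simp only [pvG, List.foldl_cons, pvGroupStep, hx, ne_eq, not_false_eq_true, if_true]

-- B's two phases equal the foldl of the per-read normal form.
theorem pvFlatten (u : List (String × List (String × Int))) :
    ∀ (l : List (String × List (String × Int))) (st : PySem.Dict String Int × PySem.Dict String Int),
    (l.map Prod.fst).Nodup →
    pvG (l.flatMap (pvSeg u)) (st, none) = l.foldl (pvStepB u) st := by
  intro l
  induction l with
  | nil => intro st _; rfl
  | cons p l ih =>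
    intro st hnd
    simp only [List.map_cons, List.nodup_cons] at hnd
    have hrest : ∀ x ∈ l.flatMap (pvSeg u), x.1 ≠ p.1 := by
      intro x hx he
      obtain ⟨q, hq, hxq⟩ := List.mem_flatMap.mp hx
      have : x.1 = q.1 := by
        simp only [pvSeg, List.mem_map] at hxq
        obtain ⟨v, -, hv⟩ := hxq
        exact (congrArg Prod.fst hv).symm
      exact hnd.1 (by rw [← he, this]; exact List.mem_map_of_mem hq)
    rw [List.flatMap_cons]
    have hmap : (pvSeg u p).map Prod.snd = pvMatches u p.2 := by
      simp [pvSeg, pvMatches, List.map_map, Function.comp_def]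
    have hlen : (pvSeg u p).length = (pvMatches u p.2).length := by
      simp [pvSeg, pvMatches]
    cases hseg : pvSeg u p with
    | nil =>
      have hms : (pvMatches u p.2).isEmpty = true := by
        have : (pvMatches u p.2).length = 0 := by rw [← hlen, hseg]; rfl
        simpa [List.isEmpty_iff_length_eq_zero] using this
      simp only [List.nil_append, List.foldl_cons]
      rw [ih st hnd.2]
      have : pvStepB u st p = st := by simp [pvStepB, hms]
      rw [this]
    | cons x t =>
      have hall : ∀ y ∈ pvSeg u p, y.1 = p.1 := by
        intro y hy
        simp only [pvSeg, List.mem_map] at hy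
        obtain ⟨v, -, hv⟩ := hy
        exact (congrArg Prod.fst hv).symm
      have hx1 : x.1 = p.1 := hall x (hseg ▸ List.mem_cons_self)
      have ht : ∀ y ∈ t, y.1 = p.1 := fun y hy => hall y (hseg ▸ List.mem_cons_of_mem _ hy)
      simp only [pvG, List.cons_append, List.foldl_cons, List.foldl_append]
      show pvG _ _ = _
      have hstep0 : pvGroupStep (st, none) x = (st, some (x.1, x.2, 1)) := rfl
      rw [hstep0, hx1]
      have := pvRun t p.1 ht st x.2 1
      rw [show (t.foldl pvGroupStep (st, some (p.1, x.2, 1))) =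
        (st, some (p.1, x.2 + (t.map Prod.snd).sum, 1 + (t.length : Int))) from this]
      have hS : x.2 + (t.map Prod.snd).sum = (pvMatches u p.2).sum := by
        rw [← hmap, hseg]; simp
      have hN : 1 + (t.length : Int) = ((pvMatches u p.2).length : Int) := by
        rw [← hlen, hseg]; simp [List.length_cons]; ring
      rw [hS, hN, pvDefer _ _ _ _ _ hrest, ih _ hnd.2]
      have hms : (pvMatches u p.2).isEmpty = false := by
        have : (pvMatches u p.2).length ≠ 0 := by rw [← hlen, hseg]; simp
        simpa [List.isEmpty_iff_length_eq_zero] using this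
      congr 1
      simp [pvStepB, hms]

-- ===== VERDICT (by name: the statement is the Claim_ definition above) =====
theorem get_unique_total_for_reads_spec : Claim_equal_get_unique_total_for_reads := by
  intro u m _ hpre
  obtain ⟨-, hnd, -⟩ := hpre
  unfold Spec_get_unique_total_for_reads get_unique_total_for_reads get_unique_total_for_reads_alt
  dsimp only
  set l := (PySem.Dict.mk m).getD "transcript_counts" [] with hl
  have hkeys : (PySem.Dict.mk l).keys = l.map Prod.fst := rfl
  rw [hkeys, List.foldl_map]
  have hcong : List.foldl (fun x y => List.foldl (pvStepA u y.1) x ((PySem.Dict.mk l).getD y.1 []))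
        (PySem.Dict.empty, PySem.Dict.empty) l
      = List.foldl (fun st p => p.2.foldl (pvStepA u p.1) st)
        (PySem.Dict.empty, PySem.Dict.empty) l :=
    by
      apply PySem.List.foldl_congr_mem
      intro acc x hx
      rw [PySem.Dict.getD_of_mem_items (d := PySem.Dict.mk l) (by simpa using hx) hnd]
  rw [hcong, pvOuter u l _ hnd (fun q _ => rfl)]
  have := pvFlatten u l (PySem.Dict.empty, PySem.Dict.empty) hnd
  rw [← this]
  rfl
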